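-- pv_equiv track=rewrite | github.com/microsoft/dist-ir | examples/mlp_grid_search.py | get_all_degrees
-- ===== SOURCE A (Python) =====
-- def get_all_degrees(n):
--     all_degrees = []
--     d = 1
--     h = 1
--     p = 1
--     while d <= n:
--         h = 1
--         p = 1
--         if d * h * p == n:
--             all_degrees.append((d, h, p))
--             break
--         while h <= n:
--             p = 1
--             if d * h * p == n:
--                 all_degrees.append((d, h, p))
--                 break
--             while p <= n:
--                 if d * h * p == n:
--                     all_degrees.append((d, h, p))
--                     break
--                 p *= 2
--             h *= 2
--         d *= 2
--     return all_degrees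
-- ===== SOURCE B (Python) =====
-- def get_all_degrees(n):
--     if n <= 0:
--         return []
--     k = n.bit_length() - 1
--     if 1 << k != n:
--         return []
--     return [(1 << a, 1 << b, 1 << (k - a - b))
--             for a in range(k + 1) for b in range(k - a + 1)]
-- ===== Notes on version B (the rewrite author's own statement) =====
-- stated objective: simpler
-- what changed: A's three nested doubling while-loops with break flags are replaced by a single power-of-two test (bit_length / shift) followed by direct enumeration of the exponent partitions a+b+c = log2(n).
import Mathlib
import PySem

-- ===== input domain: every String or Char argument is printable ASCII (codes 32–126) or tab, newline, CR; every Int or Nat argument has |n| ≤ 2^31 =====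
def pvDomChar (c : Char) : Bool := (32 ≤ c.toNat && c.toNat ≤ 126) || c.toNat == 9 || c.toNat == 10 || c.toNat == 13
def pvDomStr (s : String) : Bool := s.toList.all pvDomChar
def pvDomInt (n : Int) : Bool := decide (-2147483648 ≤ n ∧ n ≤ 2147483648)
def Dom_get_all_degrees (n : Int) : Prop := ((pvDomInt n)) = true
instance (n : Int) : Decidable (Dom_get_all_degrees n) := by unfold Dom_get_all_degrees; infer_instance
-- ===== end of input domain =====

-- B replaces A's three nested doubling loops by a power-of-two test plus direct
-- enumeration of exponent partitions (objective: simpler).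

-- ===== PORT A =====
-- innermost 'while p <= n' loop of A; the Nat argument is only a fuel/totality
-- guard (every reachable call carries enough fuel, proved in the lemmas below)
def loopP : Nat → Int → Int → Int → Int → List (Int × Int × Int) → List (Int × Int × Int)
  | 0, _, _, _, _, acc => acc
  | fuel + 1, n, d, h, p, acc =>
    if p ≤ n then
      if d * h * p = n then acc ++ [(d, h, p)]
      else loopP fuel n d h (p * 2) acc
    else acc

-- middle 'while h <= n' loop of A (F = fresh fuel for each inner p-loop)
def loopH (F : Nat) : Nat → Int → Int → Int → List (Int × Int × Int) → List (Int × Int × Int)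
  | 0, _, _, _, acc => acc
  | fuel + 1, n, d, h, acc =>
    if h ≤ n then
      if d * h * 1 = n then acc ++ [(d, h, 1)]
      else loopH F fuel n d (h * 2) (loopP F n d h 1 acc)
    else acc

-- outer 'while d <= n' loop of A
def loopD (F : Nat) : Nat → Int → Int → List (Int × Int × Int) → List (Int × Int × Int)
  | 0, _, _, acc => acc
  | fuel + 1, n, d, acc =>
    if d ≤ n then
      if d * 1 * 1 = n then acc ++ [(d, 1, 1)]
      else loopD F fuel n (d * 2) (loopH F F n d 1 acc)
    else acc

def get_all_degrees (n : Int) : List (Int × Int × Int) :=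
  loopD (n.toNat + 2) (n.toNat + 2) n 1 []

-- ===== PORT B =====
-- n.bit_length() - 1 for n > 0 is Nat.log2 n.toNat; 1 << e is 2 ^ e
def get_all_degrees_alt (n : Int) : List (Int × Int × Int) :=
  if n ≤ 0 then []
  else
    let k := Nat.log2 n.toNat
    if (2 : Int) ^ k ≠ n then []
    else (List.range (k + 1)).flatMap fun a =>
      (List.range (k - a + 1)).map fun b =>
        ((2 : Int) ^ a, (2 : Int) ^ b, (2 : Int) ^ (k - a - b))

-- ===== PRECONDITION & SPEC =====
def Spec_get_all_degrees (n : Int) (out : List (Int × Int × Int)) : Prop := out = get_all_degrees_alt n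
instance (n : Int) (out : List (Int × Int × Int)) : Decidable (Spec_get_all_degrees n out) := by unfold Spec_get_all_degrees; infer_instance

-- ===== CLAIM (what is proved, stated in full; the proofs are below) =====
def Claim_equal_get_all_degrees : Prop := ∀ (n : Int), Dom_get_all_degrees n → Spec_get_all_degrees n (get_all_degrees n)

-- ===== LEMMAS AND PROOFS =====

theorem one_le_pow2 (e : ℕ) : (1 : Int) ≤ 2 ^ e := by
  induction e with
  | zero => norm_num
  | succ e ih => rw [pow_succ]; nlinarith

theorem pow2_le_pow2 {a b : ℕ} (h : a ≤ b) : (2 : Int) ^ a ≤ 2 ^ b := by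
  gcongr
  norm_num

theorem pow2_lt_pow2 {a b : ℕ} (h : a < b) : (2 : Int) ^ a < 2 ^ b := by
  gcongr
  norm_num

theorem pow2_inj {a b : ℕ} (h : (2 : Int) ^ a = (2 : Int) ^ b) : a = b := by
  rcases Nat.lt_trichotomy a b with hlt | heq | hlt
  · exact absurd h (ne_of_lt (pow2_lt_pow2 hlt))
  · exact heq
  · exact absurd h.symm (ne_of_lt (pow2_lt_pow2 hlt))

-- p ≤ d*h*(p*2^e) for d,h,p ≥ 1
theorem p_le_goal (d h p : Int) (e : ℕ) (hd : 1 ≤ d) (hh : 1 ≤ h) (hp : 1 ≤ p) :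
    p ≤ d * h * (p * 2 ^ e) := by
  have h1 : (1 : Int) ≤ 2 ^ e := one_le_pow2 e
  have hp2 : p ≤ p * 2 ^ e := le_mul_of_one_le_right (by omega) h1
  have hdh : (1 : Int) ≤ d * h := by nlinarith
  have hnn : (0 : Int) ≤ p * 2 ^ e := by linarith
  calc p ≤ p * 2 ^ e := hp2
    _ = 1 * (p * 2 ^ e) := (one_mul _).symm
    _ ≤ (d * h) * (p * 2 ^ e) := mul_le_mul_of_nonneg_right hdh hnn

theorem p_lt_goal (d h p : Int) (e : ℕ) (hd : 1 ≤ d) (hh : 1 ≤ h) (hp : 1 ≤ p) :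
    d * h * p < d * h * (p * 2 ^ (e + 1)) := by
  have h1 : (2 : Int) ≤ 2 ^ (e + 1) := by
    have := one_le_pow2 e; rw [pow_succ]; nlinarith
  have hplt : p < p * 2 ^ (e + 1) := by nlinarith
  have hdh : (0 : Int) < d * h := by nlinarith
  exact mul_lt_mul_of_pos_left hplt hdh

-- the inner loop adds nothing when no doubling of p reaches n
theorem loopP_none : ∀ (F : ℕ) (n d h p : Int) (acc : List (Int × Int × Int)),
    1 ≤ p → (n + 1 - p).toNat < F → (∀ c : ℕ, d * h * (p * 2 ^ c) ≠ n) →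
    loopP F n d h p acc = acc := by
  intro F
  induction F with
  | zero => intro n d h p acc _ hF _; omega
  | succ F ih =>
    intro n d h p acc hp hF hno
    simp only [loopP]
    by_cases h1 : p ≤ n
    · rw [if_pos h1]
      rw [if_neg (fun he => hno 0 (by linear_combination he))]
      exact ih n d h (p * 2) acc (by omega) (by omega)
        (fun c hc => hno (c + 1) (by rw [pow_succ]; linear_combination hc))
    · rw [if_neg h1]

-- the inner loop started at p with n = d*h*(p*2^c) appends exactly (d,h,p*2^c)
theorem loopP_found (d h : Int) (hd : 1 ≤ d) (hh : 1 ≤ h) : ∀ (c : ℕ) (F : ℕ) (n p : Int),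
    1 ≤ p → (n + 1 - p).toNat < F → n = d * h * (p * 2 ^ c) →
    ∀ acc, loopP F n d h p acc = acc ++ [(d, h, p * 2 ^ c)] := by
  intro c
  induction c with
  | zero =>
    intro F n p hp hF hn acc
    match F with
    | 0 => omega
    | F + 1 =>
      simp only [loopP]
      rw [if_pos (hn ▸ p_le_goal d h p 0 hd hh hp)]
      rw [if_pos (show d * h * p = n by rw [hn]; ring)]
      norm_num
  | succ c ihc =>
    intro F n p hp hF hn acc
    match F with
    | 0 => omega
    | F + 1 =>
      have hlt : p < n := by
        have h1 := p_lt_goal d h p c hd hh hp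
        have h2 := p_le_goal d h p 0 hd hh hp
        rw [← hn] at h1
        simp only [pow_zero, mul_one] at h2
        omega
      simp only [loopP]
      rw [if_pos (by omega : p ≤ n)]
      rw [if_neg (show ¬ d * h * p = n by
        have := p_lt_goal d h p c hd hh hp; rw [← hn] at this; omega)]
      rw [ihc F n (p * 2) (by omega) (by omega) (by rw [hn]; ring) acc]
      have he : p * 2 * 2 ^ c = p * 2 ^ (c + 1) := by ring
      rw [he]

-- when n is not a power of two, the middle loop (over powers of two) adds nothing
theorem loopH_npow (F : ℕ) : ∀ (fuel : ℕ) (n : Int) (a b : ℕ) (acc : List (Int × Int × Int)),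
    (n + 1 - 2 ^ b).toNat < fuel → n.toNat < F → (∀ e : ℕ, (2 : Int) ^ e ≠ n) →
    loopH F fuel n (2 ^ a) (2 ^ b) acc = acc := by
  intro fuel
  induction fuel with
  | zero => intro n a b acc hf _ _; omega
  | succ fuel ih =>
    intro n a b acc hf hF hno
    simp only [loopH]
    by_cases h1 : (2 : Int) ^ b ≤ n
    · rw [if_pos h1]
      rw [if_neg (fun he => hno (a + b) (by rw [← he]; ring))]
      rw [loopP_none F n (2 ^ a) (2 ^ b) 1 acc (le_refl 1) (by omega)
        (fun c hc => hno (a + b + c) (by rw [← hc]; ring))]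
      have he : (2 : Int) ^ b * 2 = 2 ^ (b + 1) := (pow_succ 2 b).symm
      rw [he]
      refine ih n a (b + 1) acc ?_ hF hno
      have hb1 : (1 : Int) ≤ 2 ^ b := one_le_pow2 b
      have hlt : (2 : Int) ^ b < 2 ^ (b + 1) := pow2_lt_pow2 (by omega)
      omega
    · rw [if_neg h1]

-- when n is not a power of two, the whole outer loop adds nothing
theorem loopD_npow (F : ℕ) : ∀ (fuel : ℕ) (n : Int) (a : ℕ) (acc : List (Int × Int × Int)),
    (n + 1 - 2 ^ a).toNat < fuel → n.toNat < F → (∀ e : ℕ, (2 : Int) ^ e ≠ n) →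
    loopD F fuel n (2 ^ a) acc = acc := by
  intro fuel
  induction fuel with
  | zero => intro n a acc hf _ _; omega
  | succ fuel ih =>
    intro n a acc hf hF hno
    simp only [loopD]
    by_cases h1 : (2 : Int) ^ a ≤ n
    · rw [if_pos h1]
      rw [if_neg (fun he => hno a (by rw [← he]; ring))]
      have h0 : (1 : Int) = 2 ^ (0 : ℕ) := by norm_num
      rw [h0, loopH_npow F F n a 0 acc (by simp; omega) hF hno]
      have he : (2 : Int) ^ a * 2 = 2 ^ (a + 1) := (pow_succ 2 a).symm
      rw [he]
      refine ih n (a + 1) acc ?_ hF hno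
      have hb1 : (1 : Int) ≤ 2 ^ a := one_le_pow2 a
      have hlt : (2 : Int) ^ a < 2 ^ (a + 1) := pow2_lt_pow2 (by omega)
      omega
    · rw [if_neg h1]

-- middle loop on n = 2^k, d = 2^a: the whole row of (a, b') triples, b' ≥ b
theorem loopH_pow (k a : ℕ) (ha : a ≤ k) (F : ℕ) (hF : ((2:Int) ^ k).toNat < F) :
    ∀ (fuel b : ℕ), k + 1 - b < fuel →
    ∀ acc, loopH F fuel ((2:Int) ^ k) ((2:Int) ^ a) ((2:Int) ^ b) acc =
      acc ++ (List.range' b (k - a + 1 - b)).map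
        (fun b' => ((2:Int) ^ a, (2:Int) ^ b', (2:Int) ^ (k - a - b'))) := by
  intro fuel
  induction fuel with
  | zero => intro b hf acc; omega
  | succ fuel ih =>
    intro b hf acc
    simp only [loopH]
    by_cases hbk : b ≤ k
    · rw [if_pos (pow2_le_pow2 hbk)]
      by_cases hab : a + b = k
      · rw [if_pos (by rw [← hab]; ring : (2:Int) ^ a * 2 ^ b * 1 = 2 ^ k)]
        have h1 : k - a + 1 - b = 1 := by omega
        have h2 : k - a - b = 0 := by omega
        simp [h1, h2]
      · rw [if_neg (fun hcon => hab (pow2_inj (by rw [← hcon]; ring)))]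
        have he : (2 : Int) ^ b * 2 = 2 ^ (b + 1) := (pow_succ 2 b).symm
        rw [he]
        by_cases hlt : a + b < k
        · -- the inner p-loop finds the completing power 2^(k-a-b)
          rw [loopP_found ((2:Int)^a) ((2:Int)^b) (one_le_pow2 a) (one_le_pow2 b)
            (k - a - b) F ((2:Int) ^ k) 1 (le_refl 1) (by omega)
            (by rw [one_mul, ← pow_add, ← pow_add]; congr 1; omega) acc]
          rw [ih (b + 1) (by omega)]
          have hr : List.range' b (k - a + 1 - b) =
              b :: List.range' (b + 1) (k - a + 1 - (b + 1)) := by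
            have hcnt : k - a + 1 - b = (k - a + 1 - (b + 1)) + 1 := by omega
            rw [hcnt, List.range'_succ]
          rw [hr]
          simp
        · -- a + b > k: the inner loop finds nothing and all remaining rows are empty
          have hgt : k < a + b := by omega
          rw [loopP_none F ((2:Int)^k) _ _ 1 acc (le_refl 1) (by omega) ?_]
          · rw [ih (b + 1) (by omega)]
            have h3 : k - a + 1 - b = 0 := by omega
            have h4 : k - a + 1 - (b + 1) = 0 := by omega
            simp [h3, h4]
          · intro c hc
            have : a + b + c = k := pow2_inj (by rw [← hc]; ring)
            omega
    · rw [if_neg (by simpa using pow2_lt_pow2 (by omega : k < b) : ¬ ((2:Int) ^ b ≤ 2 ^ k))]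
      have hc : k - a + 1 - b = 0 := by omega
      simp [hc]

-- outer loop on n = 2^k from d = 2^a: all blocks for exponents a..k
theorem loopD_pow (k : ℕ) (F : ℕ) (hF : ((2:Int) ^ k).toNat < F) :
    ∀ (fuel a : ℕ), a ≤ k → k + 1 - a < fuel →
    ∀ acc, loopD F fuel ((2:Int) ^ k) ((2:Int) ^ a) acc =
      acc ++ (List.range' a (k + 1 - a)).flatMap
        (fun a' => (List.range (k - a' + 1)).map
          (fun b => ((2:Int) ^ a', (2:Int) ^ b, (2:Int) ^ (k - a' - b)))) := by
  intro fuel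
  induction fuel with
  | zero => intro a ha hf acc; omega
  | succ fuel ih =>
    intro a ha hf acc
    simp only [loopD]
    rw [if_pos (pow2_le_pow2 ha)]
    by_cases hak : a = k
    · subst hak
      rw [if_pos (by ring : (2:Int) ^ a * 1 * 1 = 2 ^ a)]
      have h1 : a + 1 - a = 1 := by omega
      simp [h1]
    · rw [if_neg (fun hcon => hak (pow2_inj (by rw [← hcon]; ring)))]
      have hfk : k + 1 - 0 < F := by
        have h2k : k < 2 ^ k := Nat.lt_two_pow_self
        have htn : ((2:Int) ^ k).toNat = 2 ^ k := by
          rw [← Nat.cast_ofNat (n := 2), ← Nat.cast_pow]; exact Int.toNat_natCast _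
        omega
      have h0 : (1 : Int) = 2 ^ (0 : ℕ) := by norm_num
      rw [h0, loopH_pow k a (by omega) F hF F 0 hfk acc]
      have he : (2 : Int) ^ a * 2 = 2 ^ (a + 1) := (pow_succ 2 a).symm
      rw [he, ih (a + 1) (by omega) (by omega)]
      have hr : List.range' a (k + 1 - a) =
          a :: List.range' (a + 1) (k + 1 - (a + 1)) := by
        have hcnt : k + 1 - a = (k + 1 - (a + 1)) + 1 := by omega
        rw [hcnt, List.range'_succ]
      rw [hr, List.flatMap_cons]
      have h3 : k - a + 1 - 0 = k - a + 1 := by omega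
      simp [h3, List.range_eq_range', List.append_assoc]

theorem log2_two_pow (k : ℕ) : Nat.log2 (2 ^ k) = k := by
  rw [Nat.log2_eq_log_two]
  exact Nat.log_pow (by norm_num) k

-- ===== VERDICT (by name: the statement is the Claim_ definition above) =====
theorem get_all_degrees_spec : Claim_equal_get_all_degrees := by
  intro n _
  unfold Spec_get_all_degrees get_all_degrees get_all_degrees_alt
  by_cases hn : n ≤ 0
  · rw [if_pos hn]
    have h2 : n.toNat + 2 = (n.toNat + 1) + 1 := rfl
    rw [h2]
    simp only [loopD]
    have hno : ¬ ((1:Int) ≤ n) := by omega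
    simp [hno]
  · rw [if_neg hn]
    by_cases hpow : ∃ k : ℕ, n = (2:Int) ^ k
    · obtain ⟨k, rfl⟩ := hpow
      have htn : ((2:Int) ^ k).toNat = 2 ^ k := by
        rw [← Nat.cast_ofNat (n := 2), ← Nat.cast_pow]; exact Int.toNat_natCast _
      simp only [htn, log2_two_pow]
      rw [if_neg (by simp)]
      have h2k : k < 2 ^ k := Nat.lt_two_pow_self
      have h0 : (1 : Int) = 2 ^ (0 : ℕ) := by norm_num
      rw [h0, loopD_pow k (2 ^ k + 2) (by rw [htn]; omega) (2 ^ k + 2) 0 (by omega) (by omega) []]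
      simp [List.range_eq_range']
    · have hno : ∀ e : ℕ, (2:Int) ^ e ≠ n := fun e h => hpow ⟨e, h.symm⟩
      have h0 : (1 : Int) = 2 ^ (0 : ℕ) := by norm_num
      rw [h0, loopD_npow (n.toNat + 2) (n.toNat + 2) n 0 [] (by simp) (by omega) hno]
      simp only [if_pos (hno (Nat.log2 n.toNat))]
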